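-- pv_equiv track=rewrite | github.com/zcx01/Achievement | pythonscript/AutoCode/AutoCode.py | analylineBrackets
-- ===== SOURCE A (Python) =====
-- def analylineBrackets(content):
--     num=0
--     for char in content:
--         if char == '{':
--             num+=1
--         elif char == "}":
--             num-=1
--     return num
-- ===== SOURCE B (Python) =====
-- def analylineBrackets(content):
--     s = list(content)
--
--     def bal(lo, hi):
--         if hi - lo == 0:
--             return 0
--         if hi - lo == 1:
--             c = s[lo]
--             return 1 if c == '{' else (-1 if c == '}' else 0)
--         mid = (lo + hi) // 2
--         return bal(lo, mid) + bal(mid, hi)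
--
--     return bal(0, len(s))
-- ===== Notes on version B (the rewrite author's own statement) =====
-- stated objective: alternative
-- what changed: Replaces A's left-to-right loop with a running counter by a divide-and-conquer recursion: the string is split in halves, each half's brace balance is computed recursively, and the two balances are added (correct because balance is additive over concatenation).
import Mathlib
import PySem

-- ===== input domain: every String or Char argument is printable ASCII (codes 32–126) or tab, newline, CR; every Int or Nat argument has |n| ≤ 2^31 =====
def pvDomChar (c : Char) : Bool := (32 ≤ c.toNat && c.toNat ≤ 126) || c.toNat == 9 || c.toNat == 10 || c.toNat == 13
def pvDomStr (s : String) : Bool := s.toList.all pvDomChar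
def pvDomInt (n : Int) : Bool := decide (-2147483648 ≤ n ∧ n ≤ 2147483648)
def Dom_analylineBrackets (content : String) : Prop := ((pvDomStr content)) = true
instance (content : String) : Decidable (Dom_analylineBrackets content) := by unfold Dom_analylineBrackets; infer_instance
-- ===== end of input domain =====

-- B replaces A's single accumulating left-to-right loop by a divide-and-conquer recursion
-- (split the string in halves, add the two halves' balances); alternative structure, same cost.

-- ===== PORT A =====
-- for char in content: if char == '{': num += 1 elif char == '}': num -= 1
def analylineBrackets (content : String) : Int :=
  content.toList.foldl
    (fun num char => if char == '{' then num + 1 else if char == '}' then num - 1 else num) 0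

-- ===== PORT B =====
-- bal(lo, hi): balance of s[lo:hi] by splitting at mid = (lo+hi)//2
def altBal (s : List Char) (lo hi : Nat) : Int :=
  if hi - lo = 0 then 0
  else if hi - lo = 1 then
    let c := s.getD lo ' '   -- s[lo]; always in range when called from analylineBrackets_alt
    if c = '{' then 1 else if c = '}' then -1 else 0
  else
    altBal s lo ((lo + hi) / 2) + altBal s ((lo + hi) / 2) hi
termination_by hi - lo
decreasing_by
  · omega
  · omega

def analylineBrackets_alt (content : String) : Int :=
  altBal content.toList 0 content.toList.length

-- ===== PRECONDITION & SPEC =====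
def Spec_analylineBrackets (content : String) (out : Int) : Prop := out = analylineBrackets_alt content
instance (content : String) (out : Int) : Decidable (Spec_analylineBrackets content out) := by unfold Spec_analylineBrackets; infer_instance

-- ===== CLAIM (what is proved, stated in full; the proofs are below) =====
def Claim_equal_analylineBrackets : Prop := ∀ (content : String), Dom_analylineBrackets content → Spec_analylineBrackets content (analylineBrackets content)

-- ===== LEMMAS AND PROOFS =====

-- A's loop computes count '{' minus count '}'.
theorem foldl_brackets (l : List Char) (n : Int) :
    l.foldl (fun num char => if char == '{' then num + 1 else if char == '}' then num - 1 else num) n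
      = n + (l.count '{' : Int) - (l.count '}' : Int) := by
  induction l generalizing n with
  | nil => simp
  | cons hd t ih =>
    simp only [List.foldl_cons, List.count_cons, ih]
    by_cases h1 : hd == '{'
    · have : hd = '{' := beq_iff_eq.mp h1
      subst this; simp; omega
    · simp only [h1]
      by_cases h2 : hd == '}'
      · have : hd = '}' := beq_iff_eq.mp h2
        subst this; simp; omega
      · have e1 : ¬ hd = '{' := fun e => h1 (by simp [e])
        have e2 : ¬ hd = '}' := fun e => h2 (by simp [e])
        simp [h2]

-- the slice s[lo:hi] as a list
def sliceLH (s : List Char) (lo hi : Nat) : List Char := (s.drop lo).take (hi - lo)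

theorem slice_split (s : List Char) (lo mid hi : Nat) (h1 : lo ≤ mid) (h2 : mid ≤ hi) :
    sliceLH s lo hi = sliceLH s lo mid ++ sliceLH s mid hi := by
  unfold sliceLH
  have e : hi - lo = (mid - lo) + (hi - mid) := by omega
  rw [e, List.take_add, List.drop_drop]
  have : lo + (mid - lo) = mid := by omega
  rw [this]

-- B's recursion computes the balance of the slice.
theorem altBal_eq (s : List Char) (lo hi : Nat) (hlo : lo ≤ hi) (hhi : hi ≤ s.length) :
    altBal s lo hi = ((sliceLH s lo hi).count '{' : Int) - ((sliceLH s lo hi).count '}' : Int) := by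
  generalize hd : hi - lo = d
  induction d using Nat.strong_induction_on generalizing lo hi with
  | _ d ih =>
    rw [altBal]
    by_cases h0 : hi - lo = 0
    · have : sliceLH s lo hi = [] := by unfold sliceLH; rw [h0]; simp
      simp [h0, this]
    · by_cases h1 : hi - lo = 1
      · have hlt : lo < s.length := by omega
        have hget : s.getD lo ' ' = s[lo] := by
          simp [List.getD_eq_getElem?_getD, List.getElem?_eq_getElem hlt]
        have hsl : sliceLH s lo hi = [s[lo]] := by
          unfold sliceLH
          rw [h1]
          rw [List.drop_eq_getElem_cons hlt, List.take_succ_cons, List.take_zero]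
        simp only [h1, hget, hsl]
        by_cases c1 : s[lo] = '{'
        · simp [c1]
        · by_cases c2 : s[lo] = '}'
          · simp [c2]
          · simp [c1, c2]
      · simp only [h0, if_false, h1, if_false]
        set mid := (lo + hi) / 2 with hm
        have hb1 : lo ≤ mid := by omega
        have hb2 : mid ≤ hi := by omega
        have d1 : mid - lo < d := by omega
        have d2 : hi - mid < d := by omega
        rw [ih _ d1 lo mid hb1 (by omega) rfl, ih _ d2 mid hi hb2 hhi rfl,
            slice_split s lo mid hi hb1 hb2, List.count_append, List.count_append]
        push_cast
        ring

-- ===== VERDICT (by name: the statement is the Claim_ definition above) =====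
theorem analylineBrackets_spec : Claim_equal_analylineBrackets := by
  intro content _
  unfold Spec_analylineBrackets analylineBrackets analylineBrackets_alt
  rw [foldl_brackets, altBal_eq _ _ _ (Nat.zero_le _) (le_refl _)]
  simp [sliceLH, List.take_of_length_le]
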